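-- pv_equiv track=rewrite | github.com/Frankgonghahaha/Biocrew_cc | tools/microbial_agent_evaluation/reaction_addition_tool/reaction_addition_tool.py | _get_metabolite_base_name
-- ===== SOURCE A (Python) =====
-- def _get_metabolite_base_name(metabolite_id: str) -> str:
--     """获取代谢物基础名称（去除舱室后缀）"""
--     # 移除常见的舱室后缀
--     suffixes = ['_c', '_e', '_m', '_p', '_n', '_g', '_l', '_r', '_s', '_v', '_x', '_y', '_z']
--     base_name = metabolite_id
--     for suffix in suffixes:
--         if base_name.endswith(suffix):
--             base_name = base_name[:-len(suffix)]
--             break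
--     return base_name
-- ===== SOURCE B (Python) =====
-- def _get_metabolite_base_name(metabolite_id: str) -> str:
--     """Strip a compartment suffix ('_' + one of 13 letters) by testing the last two characters directly."""
--     if len(metabolite_id) >= 2 and metabolite_id[-2] == '_' and metabolite_id[-1] in 'cemnpglrsvxyz':
--         return metabolite_id[:-2]
--     return metabolite_id
-- ===== Notes on version B (the rewrite author's own statement) =====
-- stated objective: simpler
-- what changed: Replaces the loop over 13 endswith-tested suffixes with a single direct check of the last two characters ('_' followed by a compartment letter), exploiting that every suffix is exactly two characters.
import Mathlib
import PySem

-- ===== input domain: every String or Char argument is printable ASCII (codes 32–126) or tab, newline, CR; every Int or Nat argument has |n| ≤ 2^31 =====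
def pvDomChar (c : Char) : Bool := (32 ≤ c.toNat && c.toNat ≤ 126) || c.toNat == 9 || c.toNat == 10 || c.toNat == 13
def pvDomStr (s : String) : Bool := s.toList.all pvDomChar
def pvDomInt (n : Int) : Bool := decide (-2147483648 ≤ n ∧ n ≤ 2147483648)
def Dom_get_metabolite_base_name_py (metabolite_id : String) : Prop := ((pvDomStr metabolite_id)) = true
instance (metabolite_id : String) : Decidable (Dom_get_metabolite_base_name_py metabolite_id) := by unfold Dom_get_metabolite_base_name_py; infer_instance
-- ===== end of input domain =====

-- B replaces A's loop over 13 endswith-tested suffixes by one direct check of the last two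
-- characters ('_' + compartment letter); objective: simpler (no speed claim).
-- ===== PORT A =====
-- A: try each two-char suffix with endswith, strip the first that matches (loop with break).
def pvALoop (base : String) : List String → String
  | [] => base
  | s :: rest =>
      if PySem.Str.endswith base s then
        PySem.Str.slice base none (some (-(PySem.Str.len s : Int)))
      else pvALoop base rest

def get_metabolite_base_name_py (metabolite_id : String) : String :=
  pvALoop metabolite_id ["_c", "_e", "_m", "_p", "_n", "_g", "_l", "_r", "_s", "_v", "_x", "_y", "_z"]

-- ===== PORT B =====
-- B: directly test the last two characters: '_' followed by a compartment letter.
def get_metabolite_base_name_py_alt (metabolite_id : String) : String :=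
  if 2 ≤ PySem.Str.len metabolite_id
      ∧ PySem.Str.pyGet? metabolite_id (-2) = some '_'
      ∧ PySem.Str.pyGet? metabolite_id (-1) ∈ ("cemnpglrsvxyz".toList.map some) then
    PySem.Str.slice metabolite_id none (some (-2))
  else metabolite_id

-- ===== PRECONDITION & SPEC =====
def Spec_get_metabolite_base_name_py (metabolite_id : String) (out : String) : Prop := out = get_metabolite_base_name_py_alt metabolite_id
instance (metabolite_id : String) (out : String) : Decidable (Spec_get_metabolite_base_name_py metabolite_id out) := by unfold Spec_get_metabolite_base_name_py; infer_instance

-- ===== CLAIM (what is proved, stated in full; the proofs are below) =====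
def Claim_equal_get_metabolite_base_name_py : Prop := ∀ (metabolite_id : String), Dom_get_metabolite_base_name_py metabolite_id → Spec_get_metabolite_base_name_py metabolite_id (get_metabolite_base_name_py metabolite_id)

-- ===== LEMMAS AND PROOFS =====

theorem pv_ends_iff (l r : List Char) (c1 c2 a b : Char) (hm : l = r ++ [c1, c2]) :
    (PySem.Chars.endswith l [a, b] = true) ↔ (c1 = a ∧ c2 = b) := by
  rw [PySem.Chars.endswith_iff, hm]
  constructor
  · rintro ⟨t, ht⟩
    have h2 := congrArg List.reverse ht
    simp at h2
    constructor <;> tauto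
  · rintro ⟨rfl, rfl⟩
    exact ⟨r, rfl⟩

theorem pv_ends_short (l : List Char) (a b : Char) (hm : l.length < 2) :
    PySem.Chars.endswith l [a, b] = false := by
  cases hE : PySem.Chars.endswith l [a, b] with
  | false => rfl
  | true =>
      have hs := (PySem.Chars.endswith_iff l [a, b]).mp hE
      have := hs.length_le
      simp at this
      omega

set_option maxHeartbeats 800000 in
theorem pv_main (m : String) :
    get_metabolite_base_name_py m = get_metabolite_base_name_py_alt m := by
  unfold get_metabolite_base_name_py get_metabolite_base_name_py_alt
  simp only [pvALoop, show (-(PySem.Str.len "_c" : Int)) = (-2 : Int) from by decide, show (-(PySem.Str.len "_e" : Int)) = (-2 : Int) from by decide, show (-(PySem.Str.len "_m" : Int)) = (-2 : Int) from by decide, show (-(PySem.Str.len "_p" : Int)) = (-2 : Int) from by decide, show (-(PySem.Str.len "_n" : Int)) = (-2 : Int) from by decide, show (-(PySem.Str.len "_g" : Int)) = (-2 : Int) from by decide, show (-(PySem.Str.len "_l" : Int)) = (-2 : Int) from by decide, show (-(PySem.Str.len "_r" : Int)) = (-2 : Int) from by decide, show (-(PySem.Str.len "_s" : Int)) = (-2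 : Int) from by decide, show (-(PySem.Str.len "_v" : Int)) = (-2 : Int) from by decide, show (-(PySem.Str.len "_x" : Int)) = (-2 : Int) from by decide, show (-(PySem.Str.len "_y" : Int)) = (-2 : Int) from by decide, show (-(PySem.Str.len "_z" : Int)) = (-2 : Int) from by decide]
  simp only [PySem.Str.endswith_eq, PySem.Str.pyGet?_eq, PySem.Chars.pyGet?_eq_listPyGet?,
    PySem.Str.len_eq, show ("_c" : String).toList = ['_', 'c'] from by decide, show ("_e" : String).toList = ['_', 'e'] from by decide, show ("_m" : String).toList = ['_', 'm'] from by decide, show ("_p" : String).toList = ['_', 'p'] from by decide, show ("_n" : String).toList = ['_', 'n'] from by decide, show ("_g" : String).toList = ['_', 'g'] from by decide, show ("_l" : String).toList = ['_', 'l'] from by decide, show ("_r" : String).toList = ['_', 'r'] from by decide, show ("_s" : String).toList = ['_', 's'] from by decide, show ("_v" : String).toList = ['_', 'v'] from by decide, show ("_x" : String).toList = ['_', 'x'] from by decide, show ("_y" : String).toList = ['_', 'y'] from by decide, show ("_z" : String).toList = ['_', 'z'] from by decide, show ("cemnpglrsvxyz" : String).toList = ['c','e','m','n','p','g','l','r','s','v','x','y','z']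 from by decide, List.map, List.mem_cons, List.not_mem_nil, or_false]
  rcases hrev : m.toList.reverse with _ | ⟨c2, l'⟩
  · have hm : m.toList = [] := by simpa using congrArg List.reverse hrev
    have hlen : m.length = 0 := by rw [show m.length = m.toList.length from rfl, hm]; rfl
    have hEc : PySem.Chars.endswith m.toList ['_', 'c'] = false := pv_ends_short m.toList '_' 'c' (by rw [hm]; simp)
    have hEe : PySem.Chars.endswith m.toList ['_', 'e'] = false := pv_ends_short m.toList '_' 'e' (by rw [hm]; simp)
    have hEm : PySem.Chars.endswith m.toList ['_', 'm'] = false := pv_ends_short m.toList '_' 'm' (by rw [hm]; simp)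
    have hEp : PySem.Chars.endswith m.toList ['_', 'p'] = false := pv_ends_short m.toList '_' 'p' (by rw [hm]; simp)
    have hEn : PySem.Chars.endswith m.toList ['_', 'n'] = false := pv_ends_short m.toList '_' 'n' (by rw [hm]; simp)
    have hEg : PySem.Chars.endswith m.toList ['_', 'g'] = false := pv_ends_short m.toList '_' 'g' (by rw [hm]; simp)
    have hEl : PySem.Chars.endswith m.toList ['_', 'l'] = false := pv_ends_short m.toList '_' 'l' (by rw [hm]; simp)
    have hEr : PySem.Chars.endswith m.toList ['_', 'r'] = false := pv_ends_short m.toList '_' 'r' (by rw [hm]; simp)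
    have hEs : PySem.Chars.endswith m.toList ['_', 's'] = false := pv_ends_short m.toList '_' 's' (by rw [hm]; simp)
    have hEv : PySem.Chars.endswith m.toList ['_', 'v'] = false := pv_ends_short m.toList '_' 'v' (by rw [hm]; simp)
    have hEx : PySem.Chars.endswith m.toList ['_', 'x'] = false := pv_ends_short m.toList '_' 'x' (by rw [hm]; simp)
    have hEy : PySem.Chars.endswith m.toList ['_', 'y'] = false := pv_ends_short m.toList '_' 'y' (by rw [hm]; simp)
    have hEz : PySem.Chars.endswith m.toList ['_', 'z'] = false := pv_ends_short m.toList '_' 'z' (by rw [hm]; simp)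
    simp [hEc, hEe, hEm, hEp, hEn, hEg, hEl, hEr, hEs, hEv, hEx, hEy, hEz, hlen]
  rcases l' with _ | ⟨c1, rest⟩
  · have hm : m.toList = [c2] := by simpa using congrArg List.reverse hrev
    have hlen : m.length = 1 := by rw [show m.length = m.toList.length from rfl, hm]; rfl
    have hEc : PySem.Chars.endswith m.toList ['_', 'c'] = false := pv_ends_short m.toList '_' 'c' (by rw [hm]; simp)
    have hEe : PySem.Chars.endswith m.toList ['_', 'e'] = false := pv_ends_short m.toList '_' 'e' (by rw [hm]; simp)
    have hEm : PySem.Chars.endswith m.toList ['_', 'm'] = false := pv_ends_short m.toList '_' 'm' (by rw [hm]; simp)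
    have hEp : PySem.Chars.endswith m.toList ['_', 'p'] = false := pv_ends_short m.toList '_' 'p' (by rw [hm]; simp)
    have hEn : PySem.Chars.endswith m.toList ['_', 'n'] = false := pv_ends_short m.toList '_' 'n' (by rw [hm]; simp)
    have hEg : PySem.Chars.endswith m.toList ['_', 'g'] = false := pv_ends_short m.toList '_' 'g' (by rw [hm]; simp)
    have hEl : PySem.Chars.endswith m.toList ['_', 'l'] = false := pv_ends_short m.toList '_' 'l' (by rw [hm]; simp)
    have hEr : PySem.Chars.endswith m.toList ['_', 'r'] = false := pv_ends_short m.toList '_' 'r' (by rw [hm]; simp)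
    have hEs : PySem.Chars.endswith m.toList ['_', 's'] = false := pv_ends_short m.toList '_' 's' (by rw [hm]; simp)
    have hEv : PySem.Chars.endswith m.toList ['_', 'v'] = false := pv_ends_short m.toList '_' 'v' (by rw [hm]; simp)
    have hEx : PySem.Chars.endswith m.toList ['_', 'x'] = false := pv_ends_short m.toList '_' 'x' (by rw [hm]; simp)
    have hEy : PySem.Chars.endswith m.toList ['_', 'y'] = false := pv_ends_short m.toList '_' 'y' (by rw [hm]; simp)
    have hEz : PySem.Chars.endswith m.toList ['_', 'z'] = false := pv_ends_short m.toList '_' 'z' (by rw [hm]; simp)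
    simp [hEc, hEe, hEm, hEp, hEn, hEg, hEl, hEr, hEs, hEv, hEx, hEy, hEz, hlen]
  · have hm : m.toList = rest.reverse ++ [c1, c2] := by
      simpa using congrArg List.reverse hrev
    have hlen : (2 : Int) ≤ (m.toList.length : Int) := by simp [hm]
    have hg2 : PySem.List.pyGet? m.toList (-2) = some c1 := by
      rw [hm]; simp [PySem.List.pyGet?, PySem.List.pyIdx?]
    have hg1 : PySem.List.pyGet? m.toList (-1) = some c2 := by
      rw [hm]; simp [PySem.List.pyGet?, PySem.List.pyIdx?]
    have hEc : (PySem.Chars.endswith m.toList ['_', 'c'] = true) ↔ (c1 = '_' ∧ c2 = 'c') := pv_ends_iff m.toList rest.reverse c1 c2 '_' 'c' hm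
    have hEe : (PySem.Chars.endswith m.toList ['_', 'e'] = true) ↔ (c1 = '_' ∧ c2 = 'e') := pv_ends_iff m.toList rest.reverse c1 c2 '_' 'e' hm
    have hEm : (PySem.Chars.endswith m.toList ['_', 'm'] = true) ↔ (c1 = '_' ∧ c2 = 'm') := pv_ends_iff m.toList rest.reverse c1 c2 '_' 'm' hm
    have hEp : (PySem.Chars.endswith m.toList ['_', 'p'] = true) ↔ (c1 = '_' ∧ c2 = 'p') := pv_ends_iff m.toList rest.reverse c1 c2 '_' 'p' hm
    have hEn : (PySem.Chars.endswith m.toList ['_', 'n'] = true) ↔ (c1 = '_' ∧ c2 = 'n') := pv_ends_iff m.toList rest.reverse c1 c2 '_' 'n' hm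
    have hEg : (PySem.Chars.endswith m.toList ['_', 'g'] = true) ↔ (c1 = '_' ∧ c2 = 'g') := pv_ends_iff m.toList rest.reverse c1 c2 '_' 'g' hm
    have hEl : (PySem.Chars.endswith m.toList ['_', 'l'] = true) ↔ (c1 = '_' ∧ c2 = 'l') := pv_ends_iff m.toList rest.reverse c1 c2 '_' 'l' hm
    have hEr : (PySem.Chars.endswith m.toList ['_', 'r'] = true) ↔ (c1 = '_' ∧ c2 = 'r') := pv_ends_iff m.toList rest.reverse c1 c2 '_' 'r' hm
    have hEs : (PySem.Chars.endswith m.toList ['_', 's'] = true) ↔ (c1 = '_' ∧ c2 = 's') := pv_ends_iff m.toList rest.reverse c1 c2 '_' 's' hm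
    have hEv : (PySem.Chars.endswith m.toList ['_', 'v'] = true) ↔ (c1 = '_' ∧ c2 = 'v') := pv_ends_iff m.toList rest.reverse c1 c2 '_' 'v' hm
    have hEx : (PySem.Chars.endswith m.toList ['_', 'x'] = true) ↔ (c1 = '_' ∧ c2 = 'x') := pv_ends_iff m.toList rest.reverse c1 c2 '_' 'x' hm
    have hEy : (PySem.Chars.endswith m.toList ['_', 'y'] = true) ↔ (c1 = '_' ∧ c2 = 'y') := pv_ends_iff m.toList rest.reverse c1 c2 '_' 'y' hm
    have hEz : (PySem.Chars.endswith m.toList ['_', 'z'] = true) ↔ (c1 = '_' ∧ c2 = 'z') := pv_ends_iff m.toList rest.reverse c1 c2 '_' 'z' hm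
    simp only [hEc, hEe, hEm, hEp, hEn, hEg, hEl, hEr, hEs, hEv, hEx, hEy, hEz, hg1, hg2, Option.some.injEq, hlen, eq_self_iff_true, true_and]
    clear hrev hm hg1 hg2 hEc hEe hEm hEp hEn hEg hEl hEr hEs hEv hEx hEy hEz
    by_cases h1 : c1 = '_'
    · subst h1
      simp only [eq_self_iff_true, true_and]
      by_cases hd : (c2 = 'c' ∨ c2 = 'e' ∨ c2 = 'm' ∨ c2 = 'p' ∨ c2 = 'n' ∨ c2 = 'g' ∨ c2 = 'l' ∨ c2 = 'r' ∨ c2 = 's' ∨ c2 = 'v' ∨ c2 = 'x' ∨ c2 = 'y' ∨ c2 = 'z')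
      · rcases hd with rfl|rfl|rfl|rfl|rfl|rfl|rfl|rfl|rfl|rfl|rfl|rfl|rfl <;> simp
      · push_neg at hd
        obtain ⟨n1,n2,n3,n4,n5,n6,n7,n8,n9,n10,n11,n12,n13⟩ := hd
        simp [n1,n2,n3,n4,n5,n6,n7,n8,n9,n10,n11,n12,n13]
    · simp [h1]

-- ===== VERDICT (by name: the statement is the Claim_ definition above) =====
theorem get_metabolite_base_name_py_spec : Claim_equal_get_metabolite_base_name_py := by
  intro m _
  unfold Spec_get_metabolite_base_name_py
  exact pv_main m
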